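-- pv_equiv track=rewrite | github.com/HarshKumarChoudary/EmergencyHandlerCloudRun | app.py | is_emergency
-- ===== SOURCE A (Python) =====
-- def is_emergency(text):
--     """
--     Check if the text suggests an emergency situation based on simple keyword matching.
--     """
--     emergency_keywords = [
--         'help', 'emergency', 'urgent', 'danger', 'immediate assistance', 'call 911',
--         'medical emergency', 'crisis', 'accident', 'fire', 'injury', 'breakdown', 'threat'
--     ]
--
--     # Convert text to lowercase for case-insensitive matching
--     text_lower = text.lower()
--
--     # Check for emergency keywords
--     for keyword in emergency_keywords:
--         if keyword in text_lower:
--             return True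
--
--     return False
-- ===== SOURCE B (Python) =====
-- def is_emergency(text):
--     """
--     Check if the text suggests an emergency situation based on simple keyword matching.
--     """
--     emergency_keywords = [
--         'help', 'emergency', 'urgent', 'danger', 'immediate assistance', 'call 911',
--         'medical emergency', 'crisis', 'accident', 'fire', 'injury', 'breakdown', 'threat'
--     ]
--
--     text_lower = text.lower()
--
--     # Single left-to-right scan over text positions: at each position, does some keyword start here?
--     return any(
--         any(text_lower.startswith(k, i) for k in emergency_keywords)
--         for i in range(len(text_lower))
--     )
-- ===== Notes on version B (the rewrite author's own statement) =====
-- stated objective: alternative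
-- what changed: Replaced the keyword-major loop of independent substring-containment searches with a single position-major scan over the lowered text that asks at each index whether some keyword starts there via startswith.
import Mathlib
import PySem

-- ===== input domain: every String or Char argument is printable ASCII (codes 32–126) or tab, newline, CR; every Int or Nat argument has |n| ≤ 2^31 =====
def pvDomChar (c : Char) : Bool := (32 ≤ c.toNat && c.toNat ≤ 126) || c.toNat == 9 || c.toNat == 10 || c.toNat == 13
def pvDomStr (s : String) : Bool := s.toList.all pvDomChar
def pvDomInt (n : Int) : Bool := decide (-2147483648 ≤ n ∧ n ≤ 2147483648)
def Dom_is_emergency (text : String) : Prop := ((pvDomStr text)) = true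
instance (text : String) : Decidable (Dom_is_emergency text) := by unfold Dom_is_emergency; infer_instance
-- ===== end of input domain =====

-- B differs from A only in traversal strategy (position-major scan vs keyword-major substring searches); same boolean result.

-- ===== PORT A =====
def aKeywords : List String :=
  ["help", "emergency", "urgent", "danger", "immediate assistance", "call 911",
   "medical emergency", "crisis", "accident", "fire", "injury", "breakdown", "threat"]

-- for-loop with 'return True' on first hit = List.any over the keyword list
def is_emergency (text : String) : Bool :=
  let text_lower := PySem.Str.lower text
  aKeywords.any (fun keyword => PySem.Str.isIn keyword text_lower)

-- ===== PORT B =====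
def bKeywords : List (List Char) :=
  ["help".toList, "emergency".toList, "urgent".toList, "danger".toList,
   "immediate assistance".toList, "call 911".toList, "medical emergency".toList,
   "crisis".toList, "accident".toList, "fire".toList, "injury".toList,
   "breakdown".toList, "threat".toList]

-- any over range(len(t)) of: any keyword starts at position i (startswith(k, i) = k prefix of drop i)
def is_emergency_alt (text : String) : Bool :=
  let t := PySem.Chars.lower text.toList
  (List.range t.length).any (fun i =>
    bKeywords.any (fun k => PySem.Chars.startswith (t.drop i) k))

-- ===== PRECONDITION & SPEC =====
def Spec_is_emergency (text : String) (out : Bool) : Prop := out = is_emergency_alt text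
instance (text : String) (out : Bool) : Decidable (Spec_is_emergency text out) := by unfold Spec_is_emergency; infer_instance

-- ===== CLAIM (what is proved, stated in full; the proofs are below) =====
def Claim_equal_is_emergency : Prop := ∀ (text : String), Dom_is_emergency text → Spec_is_emergency text (is_emergency text)

-- ===== LEMMAS AND PROOFS =====

-- a nonempty pattern is an infix iff it is a prefix of some suffix starting strictly inside the text
lemma infix_iff_exists_lt_prefix_drop (k t : List Char) (hk : k ≠ []) :
    k <:+: t ↔ ∃ i < t.length, k <+: t.drop i := by
  constructor
  · intro h
    have h' : ∃ j, k <+: t.drop j :=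
      (PySem.Chars.exists_prefix_drop_iff_isIn k t).mpr
        ((PySem.Chars.isIn_iff_infix k t).mpr h)
    obtain ⟨j, hj⟩ := h'
    refine ⟨j, ?_, hj⟩
    by_contra hlt
    have : t.drop j = [] := List.drop_eq_nil_of_le (by omega)
    rw [this] at hj
    exact hk (List.prefix_nil.mp hj)
  · rintro ⟨i, _, hp⟩
    exact (PySem.Chars.isIn_iff_infix k t).mp
      ((PySem.Chars.exists_prefix_drop_iff_isIn k t).mp ⟨i, hp⟩)

lemma ab_agree (text : String) : is_emergency text = is_emergency_alt text := by
  rw [Bool.eq_iff_iff]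
  simp only [is_emergency, is_emergency_alt, List.any_eq_true,
    PySem.Str.isIn_iff_infix, PySem.Str.toList_lower,
    PySem.Chars.startswith_iff, List.mem_range]
  constructor
  · rintro ⟨kw, hmem, hinf⟩
    have hk : kw.toList ≠ [] := by fin_cases hmem <;> decide
    obtain ⟨i, hi, hp⟩ :=
      (infix_iff_exists_lt_prefix_drop _ _ hk).mp hinf
    refine ⟨i, hi, kw.toList, ?_, hp⟩
    fin_cases hmem <;> decide
  · rintro ⟨i, hi, k, hkmem, hp⟩
    have hk : k ≠ [] := by fin_cases hkmem <;> decide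
    have hkw : ∃ kw ∈ aKeywords, kw.toList = k := by
      fin_cases hkmem <;> exact ⟨_, by decide, rfl⟩
    obtain ⟨kw, hkwmem, rfl⟩ := hkw
    exact ⟨kw, hkwmem, (infix_iff_exists_lt_prefix_drop _ _ hk).mpr ⟨i, hi, hp⟩⟩

-- ===== VERDICT (by name: the statement is the Claim_ definition above) =====
theorem is_emergency_spec : Claim_equal_is_emergency := by
  intro text _
  unfold Spec_is_emergency
  exact ab_agree text
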